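-- pv_equiv track=rewrite | github.com/kathirvel-p22/Aivonity_App | backend/app/ml/model_utils.py | _get_feature_names_for_component
-- ===== SOURCE A (Python) =====
-- from typing import Dict, Any, List, Optional, Tuple
--
-- def _get_feature_names_for_component(component: str) -> List[str]:
--     """Get feature names for a specific component"""
--     component_features = {
--         "engine": [
--             "engine_temp_mean", "engine_temp_std", "engine_temp_current",
--             "oil_pressure_mean", "oil_pressure_std", "oil_pressure_current",
--             "rpm_mean", "rpm_std", "rpm_current",
--             "engine_load_mean", "engine_load_std", "engine_load_current",
--             "fuel_consumption_mean", "fuel_consumption_std", "fuel_consumption_current",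
--             "temporal_position", "data_quality", "trend_indicator"
--         ],
--         "transmission": [
--             "transmission_temp_mean", "transmission_temp_std", "transmission_temp_current",
--             "gear_position_mean", "gear_position_std", "gear_position_current",
--             "rpm_mean", "rpm_std", "rpm_current",
--             "speed_mean", "speed_std", "speed_current",
--             "transmission_pressure_mean", "transmission_pressure_std", "transmission_pressure_current",
--             "temporal_position", "data_quality", "trend_indicator"
--         ],
--         "battery": [
--             "battery_voltage_mean", "battery_voltage_std", "battery_voltage_current",
--             "charging_current_mean", "charging_current_std", "charging_current_current",
--             "battery_temp_mean", "battery_temp_std", "battery_temp_current",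
--             "alternator_output_mean", "alternator_output_std", "alternator_output_current",
--             "temporal_position", "data_quality", "trend_indicator"
--         ],
--         "brakes": [
--             "brake_pressure_mean", "brake_pressure_std", "brake_pressure_current",
--             "brake_temp_mean", "brake_temp_std", "brake_temp_current",
--             "speed_mean", "speed_std", "speed_current",
--             "brake_fluid_level_mean", "brake_fluid_level_std", "brake_fluid_level_current",
--             "abs_activity_mean", "abs_activity_std", "abs_activity_current",
--             "temporal_position", "data_quality", "trend_indicator"
--         ],
--         "cooling_system": [
--             "engine_temp_mean", "engine_temp_std", "engine_temp_current",
--             "coolant_temp_mean", "coolant_temp_std", "coolant_temp_current",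
--             "fan_speed_mean", "fan_speed_std", "fan_speed_current",
--             "coolant_level_mean", "coolant_level_std", "coolant_level_current",
--             "thermostat_position_mean", "thermostat_position_std", "thermostat_position_current",
--             "temporal_position", "data_quality", "trend_indicator"
--         ],
--         "fuel_system": [
--             "fuel_pressure_mean", "fuel_pressure_std", "fuel_pressure_current",
--             "fuel_level_mean", "fuel_level_std", "fuel_level_current",
--             "engine_load_mean", "engine_load_std", "engine_load_current",
--             "fuel_consumption_mean", "fuel_consumption_std", "fuel_consumption_current",
--             "injector_pulse_mean", "injector_pulse_std", "injector_pulse_current",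
--             "temporal_position", "data_quality", "trend_indicator"
--         ]
--     }
--
--     return component_features.get(component, [f"feature_{i}" for i in range(20)])
-- ===== SOURCE B (Python) =====
-- # B: base-signal table + suffix-generating pass instead of fully-spelled feature lists (simpler).
-- _BASE_SIGNALS = {
--     "engine": ["engine_temp", "oil_pressure", "rpm", "engine_load", "fuel_consumption"],
--     "transmission": ["transmission_temp", "gear_position", "rpm", "speed", "transmission_pressure"],
--     "battery": ["battery_voltage", "charging_current", "battery_temp", "alternator_output"],
--     "brakes": ["brake_pressure", "brake_temp", "speed", "brake_fluid_level", "abs_activity"],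
--     "cooling_system": ["engine_temp", "coolant_temp", "fan_speed", "coolant_level", "thermostat_position"],
--     "fuel_system": ["fuel_pressure", "fuel_level", "engine_load", "fuel_consumption", "injector_pulse"],
-- }
--
-- def _get_feature_names_for_component(component: str):
--     bases = _BASE_SIGNALS.get(component)
--     if bases is None:
--         return [f"feature_{i}" for i in range(20)]
--     return [f"{b}_{s}" for b in bases for s in ("mean", "std", "current")] + [
--         "temporal_position", "data_quality", "trend_indicator"]
-- ===== Notes on version B (the rewrite author's own statement) =====
-- stated objective: simpler
-- what changed: A stores a fully-spelled 18-element feature list per component; B stores only the base signal names per component and generates the feature names by combining each base with the suffixes mean/std/current, then appending the fixed three-element tail.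
import Mathlib
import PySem

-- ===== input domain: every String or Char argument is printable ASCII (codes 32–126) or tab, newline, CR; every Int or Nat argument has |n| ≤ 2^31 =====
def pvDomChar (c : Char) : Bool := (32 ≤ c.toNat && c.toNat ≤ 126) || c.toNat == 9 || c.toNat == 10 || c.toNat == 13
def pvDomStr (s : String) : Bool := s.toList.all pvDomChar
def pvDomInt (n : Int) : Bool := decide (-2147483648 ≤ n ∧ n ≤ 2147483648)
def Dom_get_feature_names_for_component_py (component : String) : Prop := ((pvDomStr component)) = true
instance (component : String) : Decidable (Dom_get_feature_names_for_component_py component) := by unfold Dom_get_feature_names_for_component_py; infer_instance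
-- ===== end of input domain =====

-- ===== PORT A =====
-- B replaces A's fully-spelled per-component feature lists by a base-signal table plus a
-- suffix-generating pass (objective: simpler representation); return values proved equal.
def get_feature_names_for_component_py (component : String) : List String :=
  let component_features : PySem.Dict String (List String) := PySem.Dict.ofList [
    ("engine", [
      "engine_temp_mean", "engine_temp_std", "engine_temp_current",
      "oil_pressure_mean", "oil_pressure_std", "oil_pressure_current",
      "rpm_mean", "rpm_std", "rpm_current",
      "engine_load_mean", "engine_load_std", "engine_load_current",
      "fuel_consumption_mean", "fuel_consumption_std", "fuel_consumption_current",
      "temporal_position", "data_quality", "trend_indicator"]),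
    ("transmission", [
      "transmission_temp_mean", "transmission_temp_std", "transmission_temp_current",
      "gear_position_mean", "gear_position_std", "gear_position_current",
      "rpm_mean", "rpm_std", "rpm_current",
      "speed_mean", "speed_std", "speed_current",
      "transmission_pressure_mean", "transmission_pressure_std", "transmission_pressure_current",
      "temporal_position", "data_quality", "trend_indicator"]),
    ("battery", [
      "battery_voltage_mean", "battery_voltage_std", "battery_voltage_current",
      "charging_current_mean", "charging_current_std", "charging_current_current",
      "battery_temp_mean", "battery_temp_std", "battery_temp_current",
      "alternator_output_mean", "alternator_output_std", "alternator_output_current",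
      "temporal_position", "data_quality", "trend_indicator"]),
    ("brakes", [
      "brake_pressure_mean", "brake_pressure_std", "brake_pressure_current",
      "brake_temp_mean", "brake_temp_std", "brake_temp_current",
      "speed_mean", "speed_std", "speed_current",
      "brake_fluid_level_mean", "brake_fluid_level_std", "brake_fluid_level_current",
      "abs_activity_mean", "abs_activity_std", "abs_activity_current",
      "temporal_position", "data_quality", "trend_indicator"]),
    ("cooling_system", [
      "engine_temp_mean", "engine_temp_std", "engine_temp_current",
      "coolant_temp_mean", "coolant_temp_std", "coolant_temp_current",
      "fan_speed_mean", "fan_speed_std", "fan_speed_current",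
      "coolant_level_mean", "coolant_level_std", "coolant_level_current",
      "thermostat_position_mean", "thermostat_position_std", "thermostat_position_current",
      "temporal_position", "data_quality", "trend_indicator"]),
    ("fuel_system", [
      "fuel_pressure_mean", "fuel_pressure_std", "fuel_pressure_current",
      "fuel_level_mean", "fuel_level_std", "fuel_level_current",
      "engine_load_mean", "engine_load_std", "engine_load_current",
      "fuel_consumption_mean", "fuel_consumption_std", "fuel_consumption_current",
      "injector_pulse_mean", "injector_pulse_std", "injector_pulse_current",
      "temporal_position", "data_quality", "trend_indicator"])]
  component_features.getD component
    ((PySem.List.pyRange 0 20 1).map (fun i => "feature_" ++ PySem.Int.toStr i))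

-- ===== PORT B =====
def pvBaseSignals : PySem.Dict String (List String) := PySem.Dict.ofList [
  ("engine", ["engine_temp", "oil_pressure", "rpm", "engine_load", "fuel_consumption"]),
  ("transmission", ["transmission_temp", "gear_position", "rpm", "speed", "transmission_pressure"]),
  ("battery", ["battery_voltage", "charging_current", "battery_temp", "alternator_output"]),
  ("brakes", ["brake_pressure", "brake_temp", "speed", "brake_fluid_level", "abs_activity"]),
  ("cooling_system", ["engine_temp", "coolant_temp", "fan_speed", "coolant_level", "thermostat_position"]),
  ("fuel_system", ["fuel_pressure", "fuel_level", "engine_load", "fuel_consumption", "injector_pulse"])]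

def get_feature_names_for_component_py_alt (component : String) : List String :=
  match pvBaseSignals.get? component with
  | none => (PySem.List.pyRange 0 20 1).map (fun i => "feature_" ++ PySem.Int.toStr i)
  | some bases =>
      (bases.flatMap (fun b => ["mean", "std", "current"].map (fun s => b ++ "_" ++ s))) ++
        ["temporal_position", "data_quality", "trend_indicator"]

-- ===== PRECONDITION & SPEC =====
def Spec_get_feature_names_for_component_py (component : String) (out : List String) : Prop := out = get_feature_names_for_component_py_alt component
instance (component : String) (out : List String) : Decidable (Spec_get_feature_names_for_component_py component out) := by unfold Spec_get_feature_names_for_component_py; infer_instance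

-- ===== CLAIM (what is proved, stated in full; the proofs are below) =====
def Claim_equal_get_feature_names_for_component_py : Prop := ∀ (component : String), Dom_get_feature_names_for_component_py component → Spec_get_feature_names_for_component_py component (get_feature_names_for_component_py component)

-- ===== LEMMAS AND PROOFS =====
theorem pv_agree (component : String) :
    get_feature_names_for_component_py component = get_feature_names_for_component_py_alt component := by
  by_cases h1 : component = "engine"
  · subst h1; decide
  by_cases h2 : component = "transmission"
  · subst h2; decide
  by_cases h3 : component = "battery"
  · subst h3; decide
  by_cases h4 : component = "brakes"
  · subst h4; decide
  by_cases h5 : component = "cooling_system"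
  · subst h5; decide
  by_cases h6 : component = "fuel_system"
  · subst h6; decide
  · simp [get_feature_names_for_component_py, get_feature_names_for_component_py_alt,
      pvBaseSignals, PySem.Dict.ofList, PySem.Dict.update, PySem.Dict.getD,
      PySem.Dict.get?_insert_of_ne, PySem.Dict.get?_empty, h1, h2, h3, h4, h5, h6]

-- ===== VERDICT (by name: the statement is the Claim_ definition above) =====
theorem get_feature_names_for_component_py_spec : Claim_equal_get_feature_names_for_component_py := by
  intro component _
  exact pv_agree component
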